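-- pv_equiv track=rewrite | github.com/njoroge33/py_learn | arithmetic_03/word_representation_of_a_number.py | two_numb
-- ===== SOURCE A (Python) =====
-- ones = ["zero", "one", "two", "three", "four", "five", "six", "seven", "eight", "nine"]
--
-- teens = ["ten", "eleven", "twelve", "thirteen", "fourteen", "fifteen", "sixteen", "seventeen", "eighteen", "nineteen"]
--
-- decade = ["", "ten", "twenty", "thirty", "forty", "fifty", "sixty", "seventy", "eighty", "ninety"]
--
-- def two_numb(num):
--     for i in num:
--         if num[0] == i and num[1] == 0:
--             return decade[i]
--         elif num[0] == 1 and num[1] == i: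
--             return teens[i]
--         elif num[0] > 1 and num[1] == i:
--             return decade[num[0]] + " " + ones[i]
-- ===== SOURCE B (Python) =====
-- ones = ["zero", "one", "two", "three", "four", "five", "six", "seven", "eight", "nine"]
--
-- teens = ["ten", "eleven", "twelve", "thirteen", "fourteen", "fifteen", "sixteen", "seventeen", "eighteen", "nineteen"]
--
-- decade = ["", "ten", "twenty", "thirty", "forty", "fifty", "sixty", "seventy", "eighty", "ninety"]
--
-- def two_numb(num):
--     a, b = num[0], num[1]
--     if b == 0:
--         return decade[a]
--     if a == 1:
--         return teens[b]
--     if a > 1: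
--         return decade[a] + " " + ones[b]
-- ===== Notes on version B (the rewrite author's own statement) =====
-- stated objective: simpler
-- what changed: The loop over num with three early-return conditions is replaced by straight-line code that binds a, b = num[0], num[1] once and decides the three cases (b==0 / a==1 / a>1) directly, with no loop at all.
-- outside the precondition, e.g. on two_numb([0, 5]): A returns None, B returns None; on two_numb([]): A returns None, B raises IndexError; on two_numb([1, 20]): A raises IndexError, B raises IndexError
import Mathlib
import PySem

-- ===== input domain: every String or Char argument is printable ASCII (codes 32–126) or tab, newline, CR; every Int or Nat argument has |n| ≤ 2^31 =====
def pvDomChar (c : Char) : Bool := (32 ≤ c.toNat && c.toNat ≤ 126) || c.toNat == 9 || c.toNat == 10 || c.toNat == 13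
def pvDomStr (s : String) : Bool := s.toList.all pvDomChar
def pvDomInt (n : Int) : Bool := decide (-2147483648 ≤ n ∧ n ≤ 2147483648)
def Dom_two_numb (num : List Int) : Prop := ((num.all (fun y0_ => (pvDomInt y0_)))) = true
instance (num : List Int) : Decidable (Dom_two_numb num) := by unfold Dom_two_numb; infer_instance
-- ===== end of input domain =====

-- B replaces A's loop-with-early-returns by straight-line conditionals on num[0], num[1] (objective: simpler).

-- ===== PORT A =====
def onesL : List String := ["zero", "one", "two", "three", "four", "five", "six", "seven", "eight", "nine"]
def teensL : List String := ["ten", "eleven", "twelve", "thirteen", "fourteen", "fifteen", "sixteen", "seventeen", "eighteen", "nineteen"]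
def decadeL : List String := ["", "ten", "twenty", "thirty", "forty", "fifty", "sixty", "seventy", "eighty", "ninety"]

-- A's `for i in num` with early returns; a=num[0], b=num[1]; "" stands for the
-- out-of-Pre_ cases (Python returns None or raises IndexError there).
def two_numb_go (a b : Int) : List Int → String
  | [] => ""
  | i :: rest =>
    if a = i ∧ b = 0 then (PySem.List.pyGet? decadeL i).getD ""
    else if a = 1 ∧ b = i then (PySem.List.pyGet? teensL i).getD ""
    else if 1 < a ∧ b = i then
      ((PySem.List.pyGet? decadeL a).getD "") ++ " " ++ ((PySem.List.pyGet? onesL i).getD "")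
    else two_numb_go a b rest

def two_numb (num : List Int) : String :=
  two_numb_go ((PySem.List.pyGet? num 0).getD 0) ((PySem.List.pyGet? num 1).getD 0) num

-- ===== PORT B =====
def two_numb_alt (num : List Int) : String :=
  let a := (PySem.List.pyGet? num 0).getD 0
  let b := (PySem.List.pyGet? num 1).getD 0
  if b = 0 then (PySem.List.pyGet? decadeL a).getD ""
  else if a = 1 then (PySem.List.pyGet? teensL b).getD ""
  else if 1 < a then
    ((PySem.List.pyGet? decadeL a).getD "") ++ " " ++ ((PySem.List.pyGet? onesL b).getD "")
  else ""

-- ===== PRECONDITION & SPEC =====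
-- Pre_ excludes exactly the inputs on which Python A does not return a string:
-- lists shorter than 2 (IndexError / implicit None), lookup indices outside
-- Python's (negative-wrapping) range for the 10-element tables (IndexError),
-- and num[0] ≤ 0 with num[1] ≠ 0, where A falls off the loop and returns None.
def Pre_two_numb (num : List Int) : Prop :=
  2 ≤ num.length ∧
  (let a := num.getD 0 0
   let b := num.getD 1 0
   if b = 0 then -10 ≤ a ∧ a ≤ 9
   else if a = 1 then -10 ≤ b ∧ b ≤ 9
   else 1 < a ∧ a ≤ 9 ∧ -10 ≤ b ∧ b ≤ 9)
instance (num : List Int) : Decidable (Pre_two_numb num) := by unfold Pre_two_numb; infer_instance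

def pvWitness_two_numb : List Int := [2, 3]

def Spec_two_numb (num : List Int) (out : String) : Prop := out = two_numb_alt num
instance (num : List Int) (out : String) : Decidable (Spec_two_numb num out) := by unfold Spec_two_numb; infer_instance

-- ===== CLAIM (what is proved, stated in full; the proofs are below) =====
def Claim_equal_two_numb : Prop := ∀ (num : List Int), Dom_two_numb num → Pre_two_numb num → Spec_two_numb num (two_numb num)

-- ===== LEMMAS AND PROOFS =====

-- ===== VERDICT (by name: the statement is the Claim_ definition above) =====
theorem two_numb_spec : Claim_equal_two_numb := by
  intro num _ hpre
  unfold Spec_two_numb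
  match num with
  | [] => simp [Pre_two_numb] at hpre
  | [_] => simp [Pre_two_numb] at hpre
  | a :: b :: rest =>
    have hab : (PySem.List.pyGet? (a :: b :: rest) 0).getD 0 = a ∧
               (PySem.List.pyGet? (a :: b :: rest) 1).getD 0 = b := by
      constructor <;> simp [pysem]
    simp only [Pre_two_numb, List.getD] at hpre
    unfold two_numb two_numb_alt
    rw [hab.1, hab.2]
    by_cases hb : b = 0
    · subst hb
      simp [two_numb_go]
    · by_cases ha1 : a = 1
      · subst ha1
        by_cases hba : b = 1
        · subst hba; simp [two_numb_go]
        · simp [two_numb_go, hb, hba, Ne.symm hba]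
      · by_cases ha : 1 < a
        · by_cases hba : b = a
          · subst hba; simp [two_numb_go, hb, ha1, ha]
          · simp [two_numb_go, hb, ha1, ha, hba]
        · -- a ≤ 0 with b ≠ 0: excluded by Pre_
          exfalso
          simp [hb, ha1] at hpre
          omega
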